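-- pv_equiv track=rewrite | github.com/SUDEEPBOTS/mybot | solver.py | accumulate_constraints
-- ===== SOURCE A (Python) =====
-- from collections import Counter, defaultdict
--
-- def accumulate_constraints(guesses):
--     """
--     Build constraints from guesses handling duplicates:
--     - greens: fixed letters by position
--     - yellows_not_pos: letter -> positions it cannot occupy
--     - min_counts: letter -> minimal total count demanded by G/Y across guesses
--     - max_counts: letter -> maximal total count implied when extra gray copies guessed
--     """
--     greens = {}
--     yellows_not_pos = defaultdict(set)
--     global_min = Counter()
--     global_max_known = {}
--
--     for word, fb in guesses:
--         gy_counts = Counter()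
--         for i, (ch, fl) in enumerate(zip(word, fb)):
--             if fl == "G":
--                 greens[i] = ch
--                 gy_counts[ch] += 1
--             elif fl == "Y":
--                 yellows_not_pos[ch].add(i)
--                 gy_counts[ch] += 1
--         # Per-guess max: if guessed k copies, but only r marked G/Y, then max occurrences <= r
--         per_guess_max = {}
--         gc = Counter(word)
--         for l, k in gc.items():
--             r = gy_counts[l]
--             if r < k:
--                 per_guess_max[l] = r
--
--         # Merge mins and maxs
--         for l, r in gy_counts.items():
--             if r > global_min[l]:
--                 global_min[l] = r
--         for l, mx in per_guess_max.items():
--             global_max_known[l] = min(global_max_known.get(l, mx), mx)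
--
--     return greens, yellows_not_pos, dict(global_min), global_max_known
-- ===== SOURCE B (Python) =====
-- from collections import Counter, defaultdict
--
-- def accumulate_constraints(guesses):
--     """Columnar rewrite: flatten guesses into one event stream, then derive each
--     of the four outputs by its own independent pass; the min/max maps are built
--     key-major (per letter over all flattened pairs) instead of merged per guess."""
--     events = [(i, ch, fl) for w, f in guesses for i, (ch, fl) in enumerate(zip(w, f))]
--
--     greens = {i: ch for i, ch, fl in events if fl == "G"}
--
--     yellows_not_pos = defaultdict(set)
--     for i, ch, fl in events:
--         if fl == "Y":
--             yellows_not_pos[ch].add(i)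
--
--     gys = [Counter(ch for ch, fl in zip(w, f) if fl == "G" or fl == "Y")
--            for w, f in guesses]
--     mins = [(l, r) for g in gys for l, r in g.items()]
--     min_counts = {l: max(r for x, r in mins if x == l)
--                   for l in dict.fromkeys(x for x, _ in mins)}
--
--     caps = [(l, g[l]) for (w, f), g in zip(guesses, gys)
--             for l, k in Counter(w).items() if g[l] < k]
--     max_counts = {l: min(r for x, r in caps if x == l)
--                   for l in dict.fromkeys(x for x, _ in caps)}
--
--     return greens, yellows_not_pos, min_counts, max_counts
-- ===== Notes on version B (the rewrite author's own statement) =====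
-- stated objective: alternative
-- what changed: A makes one guess-major pass maintaining four running accumulators merged inline per guess; B flattens the guesses into an event stream and derives each of the four outputs by its own independent pass, computing min/max constraints key-major (for each letter, a max()/min() over all flattened pairs) instead of a running merge.
import Mathlib
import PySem

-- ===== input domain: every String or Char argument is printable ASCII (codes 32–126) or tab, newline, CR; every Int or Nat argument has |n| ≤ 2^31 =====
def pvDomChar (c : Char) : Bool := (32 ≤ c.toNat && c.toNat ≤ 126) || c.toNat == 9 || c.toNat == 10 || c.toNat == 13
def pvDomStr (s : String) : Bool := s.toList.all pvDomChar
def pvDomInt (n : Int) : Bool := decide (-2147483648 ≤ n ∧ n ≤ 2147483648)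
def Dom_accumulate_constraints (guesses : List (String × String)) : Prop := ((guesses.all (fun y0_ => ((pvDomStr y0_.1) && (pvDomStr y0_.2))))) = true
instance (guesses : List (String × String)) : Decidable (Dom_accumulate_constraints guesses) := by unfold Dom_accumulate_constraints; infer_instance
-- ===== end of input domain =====

-- B rebuilds the same four constraint maps columnar (flat event stream, key-major min/max reductions) instead of A's guess-major merge; return values proved equal on all inputs.

-- ===== PORT A =====
-- state of A's guess loop: (greens, yellows_not_pos, global_min, global_max_known)
abbrev pvStateA := PySem.Dict Int String × PySem.Dict String (PySem.Set Int) × PySem.Dict String Int × PySem.Dict String Int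

def accumulate_constraints (guesses : List (String × String)) : (List (Int × String)) × (List (String × List Int)) × (List (String × Int)) × (List (String × Int)) :=
  let st := guesses.foldl (fun (st : pvStateA) wf =>
    let word := wf.1.toList
    let fb := wf.2.toList
    -- for i, (ch, fl) in enumerate(zip(word, fb)): greens / yellows / gy_counts
    let inner := (PySem.List.enumerate (word.zip fb)).foldl
      (fun (s : PySem.Dict Int String × PySem.Dict String (PySem.Set Int) × PySem.Dict String Int) p =>
        if p.2.2 = 'G' then
          (s.1.insert p.1 (String.ofList [p.2.1]), s.2.1,
           s.2.2.insert (String.ofList [p.2.1]) (s.2.2.getD (String.ofList [p.2.1]) 0 + 1))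
        else if p.2.2 = 'Y' then
          (s.1,
           s.2.1.insert (String.ofList [p.2.1]) (PySem.Set.add (s.2.1.getD (String.ofList [p.2.1]) PySem.Set.empty) p.1),
           s.2.2.insert (String.ofList [p.2.1]) (s.2.2.getD (String.ofList [p.2.1]) 0 + 1))
        else s)
      (st.1, st.2.1, (PySem.Dict.empty : PySem.Dict String Int))
    let gy := inner.2.2
    -- gc = Counter(word); per_guess_max = {l: r for l,k in gc.items() if (r := gy[l]) < k}
    let gc := PySem.Dict.counter (word.map (fun c => String.ofList [c]))
    let pgm := gc.items.foldl (fun (pm : PySem.Dict String Int) lk =>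
        if gy.getD lk.1 0 < lk.2 then pm.insert lk.1 (gy.getD lk.1 0) else pm)
      (PySem.Dict.empty : PySem.Dict String Int)
    -- merge mins: if r > global_min[l]: global_min[l] = r
    let gmin := gy.items.foldl (fun (m : PySem.Dict String Int) lr =>
        if lr.2 > m.getD lr.1 0 then m.insert lr.1 lr.2 else m) st.2.2.1
    -- merge maxs: global_max_known[l] = min(global_max_known.get(l, mx), mx)
    let gmax := pgm.items.foldl (fun (m : PySem.Dict String Int) lm =>
        m.insert lm.1 (min (m.getD lm.1 lm.2) lm.2)) st.2.2.2
    (inner.1, inner.2.1, gmin, gmax))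
    (PySem.Dict.empty, PySem.Dict.empty, PySem.Dict.empty, PySem.Dict.empty)
  (st.1.items, st.2.1.items, st.2.2.1.items, st.2.2.2.items)

-- ===== PORT B =====
-- max(...) / min(...) of a nonempty Python iterable of ints (B only calls them on nonempty ones)
def pvMaxList : List Int → Int
  | [] => 0
  | c :: t => t.foldl max c

def pvMinList : List Int → Int
  | [] => 0
  | c :: t => t.foldl min c

def accumulate_constraints_alt (guesses : List (String × String)) : (List (Int × String)) × (List (String × List Int)) × (List (String × Int)) × (List (String × Int)) :=
  -- events = [(i, ch, fl) for w, f in guesses for i, (ch, fl) in enumerate(zip(w, f))]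
  let events : List (Int × Char × Char) :=
    guesses.flatMap (fun wf => PySem.List.enumerate (wf.1.toList.zip wf.2.toList))
  -- greens = {i: ch for i, ch, fl in events if fl == "G"}
  let greens := events.foldl (fun (d : PySem.Dict Int String) p =>
      if p.2.2 = 'G' then d.insert p.1 (String.ofList [p.2.1]) else d) PySem.Dict.empty
  -- for i, ch, fl in events: if fl == "Y": yellows_not_pos[ch].add(i)
  let yellows := events.foldl (fun (d : PySem.Dict String (PySem.Set Int)) p =>
      if p.2.2 = 'Y' then
        d.insert (String.ofList [p.2.1]) (PySem.Set.add (d.getD (String.ofList [p.2.1]) PySem.Set.empty) p.1)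
      else d) PySem.Dict.empty
  -- gys = [Counter(ch for ch, fl in zip(w, f) if fl == "G" or fl == "Y") for w, f in guesses]
  let gys : List (PySem.Dict String Int) := guesses.map (fun wf =>
      PySem.Dict.counter (((wf.1.toList.zip wf.2.toList).filter
        (fun q => q.2 == 'G' || q.2 == 'Y')).map (fun q => String.ofList [q.1])))
  -- mins = [(l, r) for g in gys for l, r in g.items()]
  let mins : List (String × Int) := gys.flatMap (fun g => g.items)
  -- min_counts = {l: max(r for x, r in mins if x == l) for l in dict.fromkeys(x for x, _ in mins)}
  let min_counts := (PySem.List.dedup (mins.map (·.1))).map (fun l =>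
      (l, pvMaxList ((mins.filter (fun p => p.1 == l)).map (·.2))))
  -- caps = [(l, g[l]) for (w, f), g in zip(guesses, gys) for l, k in Counter(w).items() if g[l] < k]
  let caps : List (String × Int) := (guesses.zip gys).flatMap (fun wg =>
      (((PySem.Dict.counter (wg.1.1.toList.map (fun c => String.ofList [c]))).items.filter
        (fun lk => decide (wg.2.getD lk.1 0 < lk.2))).map (fun lk => (lk.1, wg.2.getD lk.1 0))))
  -- max_counts = {l: min(r for x, r in caps if x == l) for l in dict.fromkeys(x for x, _ in caps)}
  let max_counts := (PySem.List.dedup (caps.map (·.1))).map (fun l =>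
      (l, pvMinList ((caps.filter (fun p => p.1 == l)).map (·.2))))
  (greens.items, yellows.items, min_counts, max_counts)

-- ===== PRECONDITION & SPEC =====
def Spec_accumulate_constraints (guesses : List (String × String)) (out : (List (Int × String)) × (List (String × List Int)) × (List (String × Int)) × (List (String × Int))) : Prop := out = accumulate_constraints_alt guesses
instance (guesses : List (String × String)) (out : (List (Int × String)) × (List (String × List Int)) × (List (String × Int)) × (List (String × Int))) : Decidable (Spec_accumulate_constraints guesses out) := by unfold Spec_accumulate_constraints; infer_instance

-- ===== CLAIM (what is proved, stated in full; the proofs are below) =====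
def Claim_equal_accumulate_constraints : Prop := ∀ (guesses : List (String × String)), Dom_accumulate_constraints guesses → Spec_accumulate_constraints guesses (accumulate_constraints guesses)

-- ===== LEMMAS AND PROOFS =====

-- the step functions of A's loops, named for the proof (bodies verbatim from the port)
def pvGStep (d : PySem.Dict Int String) (p : Int × Char × Char) : PySem.Dict Int String :=
  if p.2.2 = 'G' then d.insert p.1 (String.ofList [p.2.1]) else d

def pvYStepA (b : PySem.Dict String (PySem.Set Int)) (p : Int × Char × Char) : PySem.Dict String (PySem.Set Int) :=
  if p.2.2 = 'G' then b
  else if p.2.2 = 'Y' then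
    b.insert (String.ofList [p.2.1]) (PySem.Set.add (b.getD (String.ofList [p.2.1]) PySem.Set.empty) p.1)
  else b

def pvYStepB (b : PySem.Dict String (PySem.Set Int)) (p : Int × Char × Char) : PySem.Dict String (PySem.Set Int) :=
  if p.2.2 = 'Y' then
    b.insert (String.ofList [p.2.1]) (PySem.Set.add (b.getD (String.ofList [p.2.1]) PySem.Set.empty) p.1)
  else b

def pvCStep2 (c : PySem.Dict String Int) (q : Char × Char) : PySem.Dict String Int :=
  if q.2 = 'G' then c.insert (String.ofList [q.1]) (c.getD (String.ofList [q.1]) 0 + 1)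
  else if q.2 = 'Y' then c.insert (String.ofList [q.1]) (c.getD (String.ofList [q.1]) 0 + 1)
  else c

def pvMaxStep (m : PySem.Dict String Int) (lr : String × Int) : PySem.Dict String Int :=
  if lr.2 > m.getD lr.1 0 then m.insert lr.1 lr.2 else m

def pvMinStep (m : PySem.Dict String Int) (lm : String × Int) : PySem.Dict String Int :=
  m.insert lm.1 (min (m.getD lm.1 lm.2) lm.2)

def pvEv (wf : String × String) : List (Int × Char × Char) :=
  PySem.List.enumerate (wf.1.toList.zip wf.2.toList)

def pvGyB (wf : String × String) : PySem.Dict String Int :=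
  PySem.Dict.counter (((wf.1.toList.zip wf.2.toList).filter
    (fun q => q.2 == 'G' || q.2 == 'Y')).map (fun q => String.ofList [q.1]))

def pvCapsOf (wf : String × String) : List (String × Int) :=
  ((PySem.Dict.counter (wf.1.toList.map (fun c => String.ofList [c]))).items.filter
    (fun lk => decide ((pvGyB wf).getD lk.1 0 < lk.2))).map (fun lk => (lk.1, (pvGyB wf).getD lk.1 0))

-- A's per-guess step, assembled from the named pieces (defeq to the port's inline lambda)
def pvStepAfun (st : pvStateA) (wf : String × String) : pvStateA :=
  let inner := (pvEv wf).foldl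
    (fun (s : PySem.Dict Int String × PySem.Dict String (PySem.Set Int) × PySem.Dict String Int) p =>
      if p.2.2 = 'G' then
        (s.1.insert p.1 (String.ofList [p.2.1]), s.2.1,
         s.2.2.insert (String.ofList [p.2.1]) (s.2.2.getD (String.ofList [p.2.1]) 0 + 1))
      else if p.2.2 = 'Y' then
        (s.1,
         s.2.1.insert (String.ofList [p.2.1]) (PySem.Set.add (s.2.1.getD (String.ofList [p.2.1]) PySem.Set.empty) p.1),
         s.2.2.insert (String.ofList [p.2.1]) (s.2.2.getD (String.ofList [p.2.1]) 0 + 1))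
      else s)
    (st.1, st.2.1, (PySem.Dict.empty : PySem.Dict String Int))
  let gy := inner.2.2
  let gc := PySem.Dict.counter (wf.1.toList.map (fun c => String.ofList [c]))
  let pgm := gc.items.foldl (fun (pm : PySem.Dict String Int) lk =>
      if gy.getD lk.1 0 < lk.2 then pm.insert lk.1 (gy.getD lk.1 0) else pm)
    (PySem.Dict.empty : PySem.Dict String Int)
  let gmin := gy.items.foldl (fun (m : PySem.Dict String Int) lr =>
      if lr.2 > m.getD lr.1 0 then m.insert lr.1 lr.2 else m) st.2.2.1
  let gmax := pgm.items.foldl (fun (m : PySem.Dict String Int) lm =>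
      m.insert lm.1 (min (m.getD lm.1 lm.2) lm.2)) st.2.2.2
  (inner.1, inner.2.1, gmin, gmax)

-- the inner per-position loop is componentwise
lemma pvInnerProj (ev : List (Int × Char × Char))
    (s : PySem.Dict Int String × PySem.Dict String (PySem.Set Int) × PySem.Dict String Int) :
    ev.foldl
      (fun (s : PySem.Dict Int String × PySem.Dict String (PySem.Set Int) × PySem.Dict String Int) p =>
        if p.2.2 = 'G' then
          (s.1.insert p.1 (String.ofList [p.2.1]), s.2.1,
           s.2.2.insert (String.ofList [p.2.1]) (s.2.2.getD (String.ofList [p.2.1]) 0 + 1))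
        else if p.2.2 = 'Y' then
          (s.1,
           s.2.1.insert (String.ofList [p.2.1]) (PySem.Set.add (s.2.1.getD (String.ofList [p.2.1]) PySem.Set.empty) p.1),
           s.2.2.insert (String.ofList [p.2.1]) (s.2.2.getD (String.ofList [p.2.1]) 0 + 1))
        else s) s
    = (ev.foldl pvGStep s.1, ev.foldl pvYStepA s.2.1, ev.foldl (fun c p => pvCStep2 c p.2) s.2.2) := by
  have hstep : ∀ (s' : PySem.Dict Int String × PySem.Dict String (PySem.Set Int) × PySem.Dict String Int)
      (p' : Int × Char × Char),
      (if p'.2.2 = 'G' then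
          (s'.1.insert p'.1 (String.ofList [p'.2.1]), s'.2.1,
           s'.2.2.insert (String.ofList [p'.2.1]) (s'.2.2.getD (String.ofList [p'.2.1]) 0 + 1))
        else if p'.2.2 = 'Y' then
          (s'.1,
           s'.2.1.insert (String.ofList [p'.2.1]) (PySem.Set.add (s'.2.1.getD (String.ofList [p'.2.1]) PySem.Set.empty) p'.1),
           s'.2.2.insert (String.ofList [p'.2.1]) (s'.2.2.getD (String.ofList [p'.2.1]) 0 + 1))
        else s')
      = (pvGStep s'.1 p', pvYStepA s'.2.1 p', pvCStep2 s'.2.2 p'.2) := by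
    intro s' p'
    unfold pvGStep pvYStepA pvCStep2
    split_ifs <;> rfl
  induction ev generalizing s with
  | nil => rfl
  | cons p t ih =>
    rw [List.foldl_cons, hstep s p, ih]
    rfl

-- A's per-guess gy_counts dict IS B's Counter of the G/Y-filtered letters
lemma pvGyEq (wf : String × String) :
    (pvEv wf).foldl (fun c p => pvCStep2 c p.2) PySem.Dict.empty = pvGyB wf := by
  have henum : ∀ (xs : List (Char × Char)) (k : Int) (init : PySem.Dict String Int),
      (PySem.List.enumerate xs k).foldl (fun c p => pvCStep2 c p.2) init = xs.foldl pvCStep2 init := by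
    intro xs
    induction xs with
    | nil => intro k init; rfl
    | cons q t ih => intro k init; rw [PySem.List.enumerate_cons]; simp only [List.foldl_cons]; exact ih _ _
  have hstep : pvCStep2 = (fun c q =>
      if (q.2 == 'G' || q.2 == 'Y') then c.insert (String.ofList [q.1]) (c.getD (String.ofList [q.1]) 0 + 1) else c) := by
    funext c q
    unfold pvCStep2
    by_cases h1 : q.2 = 'G'
    · simp [h1]
    · by_cases h2 : q.2 = 'Y' <;> simp [h1, h2]
  unfold pvEv pvGyB
  rw [henum, hstep, ← List.foldl_filter,
    ← List.foldl_map (f := fun q : Char × Char => String.ofList [q.1])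
      (g := fun (d : PySem.Dict String Int) x => d.insert x (d.getD x 0 + 1)),
    PySem.Dict.foldl_insert_getD_add_one_eq_counter]

-- A's per-guess max dict: a conditional fold over fresh distinct keys appends its filtered entries
lemma pvPgmItems (gy : PySem.Dict String Int) (lst : List (String × Int))
    (pm : PySem.Dict String Int) (hfresh : ∀ lk ∈ lst, pm.contains lk.1 = false)
    (hnd : (lst.map (·.1)).Nodup) :
    (lst.foldl (fun pm lk => if gy.getD lk.1 0 < lk.2 then pm.insert lk.1 (gy.getD lk.1 0) else pm) pm).items
      = pm.items ++ (lst.filter (fun lk => decide (gy.getD lk.1 0 < lk.2))).map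
          (fun lk => (lk.1, gy.getD lk.1 0)) := by
  induction lst generalizing pm with
  | nil => simp
  | cons p t ih =>
    simp only [List.foldl_cons, List.map_cons, List.nodup_cons] at *
    by_cases hp : gy.getD p.1 0 < p.2
    · rw [if_pos hp]
      rw [ih (pm.insert p.1 (gy.getD p.1 0)) ?_ hnd.2]
      · rw [PySem.Dict.items_insert_of_not_contains pm (gy.getD p.1 0) (hfresh p List.mem_cons_self)]
        simp [hp]
      · intro lk hlk
        rw [PySem.Dict.contains_insert]
        have h1 : lk.1 ≠ p.1 := by
          intro he; exact hnd.1 (he ▸ List.mem_map_of_mem hlk)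
        simp [h1, hfresh lk (List.mem_cons_of_mem p hlk)]
    · rw [if_neg hp, ih pm (fun lk hlk => hfresh lk (List.mem_cons_of_mem p hlk)) hnd.2]
      simp [hp]

-- lookup in a dict whose items list is a map over a key list
lemma pvGetMapForm (letters : List String) (v : String → Int) (l : String) :
    (PySem.Dict.mk (letters.map (fun x => (x, v x)))).get? l
      = if l ∈ letters then some (v l) else none := by
  induction letters with
  | nil => simp [PySem.Dict.get?]
  | cons x t ih =>
    rw [List.map_cons, PySem.Dict.get?_mk_cons]
    by_cases h : x = l
    · subst h; simp
    · simp only [beq_iff_eq, h, if_false, ih, List.mem_cons]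
      have : ¬ l = x := fun he => h he.symm
      simp [this]

lemma pvGet?OfItems (m : PySem.Dict String Int) (letters : List String) (v : String → Int)
    (hm : m.items = letters.map (fun x => (x, v x))) (l : String) :
    m.get? l = if l ∈ letters then some (v l) else none := by
  have he : m = PySem.Dict.mk (letters.map (fun x => (x, v x))) :=
    PySem.Dict.ext_iff.mpr hm
  rw [he, pvGetMapForm]

lemma pvMaxList_append (cs : List Int) (r : Int) (h : cs ≠ []) :
    pvMaxList (cs ++ [r]) = max (pvMaxList cs) r := by
  cases cs with
  | nil => exact absurd rfl h
  | cons c t => simp [pvMaxList, List.foldl_append]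

lemma pvMinList_append (cs : List Int) (r : Int) (h : cs ≠ []) :
    pvMinList (cs ++ [r]) = min (pvMinList cs) r := by
  cases cs with
  | nil => exact absurd rfl h
  | cons c t => simp [pvMinList, List.foldl_append]

-- key-major characterisation of A's running-max merge over a flat pair list
lemma pvCharMax (ps : List (String × Int)) (hpos : ∀ p ∈ ps, 1 ≤ p.2) :
    (ps.foldl pvMaxStep PySem.Dict.empty).items
      = (PySem.List.dedup (ps.map (·.1))).map (fun l =>
          (l, pvMaxList ((ps.filter (fun p => p.1 == l)).map (·.2)))) := by
  induction ps using List.reverseRecOn with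
  | nil => rfl
  | append_singleton ps p ih =>
    have hps : ∀ q ∈ ps, (1:Int) ≤ q.2 := fun q hq => hpos q (by simp [hq])
    have hp1 : (1:Int) ≤ p.2 := hpos p (by simp)
    rw [List.foldl_append, List.foldl_cons, List.foldl_nil]
    have hitems := ih hps
    have hget := pvGet?OfItems _ _ _ hitems
    have hded : PySem.List.dedup ((ps ++ [p]).map (·.1))
        = if p.1 ∈ ps.map (·.1) then PySem.List.dedup (ps.map (·.1))
          else PySem.List.dedup (ps.map (·.1)) ++ [p.1] := by
      simp only [List.map_append, List.map_cons, List.map_nil, PySem.List.dedup_eq_ofList,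
        PySem.Set.ofList_append_singleton, PySem.Set.add_eq_ite, PySem.Set.mem_ofList]
    have hfilt : ∀ l, (ps ++ [p]).filter (fun q => q.1 == l)
        = ps.filter (fun q => q.1 == l) ++ (if p.1 = l then [p] else []) := by
      intro l
      rw [List.filter_append, List.filter_singleton]
      by_cases h : p.1 = l
      · simp [h]
      · have hb : (p.1 == l) = false := by simpa using h
        simp [hb]
        exact h
    by_cases hmem : p.1 ∈ ps.map (·.1)
    · -- p.1 already a key; the old filtered list at p.1 is nonempty
      obtain ⟨q, hq, hq1⟩ := List.mem_map.mp hmem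
      have hne : (ps.filter (fun r => r.1 == p.1)).map (·.2) ≠ [] := by
        have : q ∈ ps.filter (fun r => r.1 == p.1) := by
          rw [List.mem_filter]; exact ⟨hq, by simp [hq1]⟩
        intro hnil
        simp only [List.map_eq_nil_iff] at hnil
        rw [hnil] at this; exact List.not_mem_nil this
      have hold : (ps.foldl pvMaxStep PySem.Dict.empty).getD p.1 0
          = pvMaxList ((ps.filter (fun q => q.1 == p.1)).map (·.2)) := by
        rw [PySem.Dict.getD_eq_get?_getD, hget, if_pos (by
          rw [PySem.List.dedup_eq_ofList, PySem.Set.mem_ofList]; exact hmem)]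
        rfl
      have hcont : (ps.foldl pvMaxStep PySem.Dict.empty).contains p.1 = true := by
        rw [PySem.Dict.contains_eq_isSome_get?, hget, if_pos (by
          rw [PySem.List.dedup_eq_ofList, PySem.Set.mem_ofList]; exact hmem)]
        rfl
      rw [hded, if_pos hmem]
      rw [show ∀ m : PySem.Dict String Int, pvMaxStep m p = if p.2 > m.getD p.1 0 then m.insert p.1 p.2 else m from fun _ => rfl]
      by_cases hgt : p.2 > (ps.foldl pvMaxStep PySem.Dict.empty).getD p.1 0
      · rw [if_pos hgt, PySem.Dict.items_insert_of_contains _ _ hcont, hitems, List.map_map]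
        apply List.map_congr_left
        intro l _
        by_cases hlp : l = p.1
        · subst hlp
          have hval : pvMaxList ((ps.filter (fun q => q.1 == p.1)).map (·.2) ++ [p.2]) = p.2 := by
            rw [pvMaxList_append _ _ hne]
            rw [hold] at hgt
            omega
          simp [Function.comp, hfilt p.1, hval]
        · have hplp : ¬ p.1 = l := fun he => hlp he.symm
          have hbl : (l == p.1) = false := by simpa using hlp
          simp [Function.comp, hbl, hfilt l, hplp]
      · rw [if_neg hgt, hitems]
        apply List.map_congr_left
        intro l _
        by_cases hlp : l = p.1
        · subst hlp
          have hval : pvMaxList ((ps.filter (fun q => q.1 == p.1)).map (·.2) ++ [p.2])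
              = pvMaxList ((ps.filter (fun q => q.1 == p.1)).map (·.2)) := by
            rw [pvMaxList_append _ _ hne]
            rw [hold] at hgt
            omega
          simp [hfilt p.1, hval]
        · have hplp : ¬ p.1 = l := fun he => hlp he.symm
          simp [hfilt l, hplp]
    · -- fresh key
      have hcont : (ps.foldl pvMaxStep PySem.Dict.empty).contains p.1 = false := by
        rw [PySem.Dict.contains_eq_isSome_get?, hget, if_neg (by
          rw [PySem.List.dedup_eq_ofList, PySem.Set.mem_ofList]; exact hmem)]
        rfl
      have hold : (ps.foldl pvMaxStep PySem.Dict.empty).getD p.1 0 = 0 :=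
        PySem.Dict.getD_of_not_contains _ 0 hcont
      have hempty : ps.filter (fun q => q.1 == p.1) = [] := by
        rw [List.filter_eq_nil_iff]
        intro q hq hbeq
        exact hmem (List.mem_map.mpr ⟨q, hq, by simpa using hbeq⟩)
      rw [show ∀ m : PySem.Dict String Int, pvMaxStep m p = if p.2 > m.getD p.1 0 then m.insert p.1 p.2 else m from fun _ => rfl]
      rw [if_pos (by omega), PySem.Dict.items_insert_of_not_contains _ _ hcont, hitems,
        hded, if_neg hmem, List.map_append]
      congr 1
      · apply List.map_congr_left
        intro l hl
        have hlmem : l ∈ ps.map (·.1) := by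
          rw [PySem.List.dedup_eq_ofList, PySem.Set.mem_ofList] at hl; exact hl
        have hplp : ¬ p.1 = l := fun he => hmem (he ▸ hlmem)
        simp [hfilt l, hplp]
      · have hs : ∀ x : Int, pvMaxList [x] = x := fun x => rfl
        simp [hempty, hs]

-- key-major characterisation of A's running-min merge over a flat pair list
lemma pvCharMin (ps : List (String × Int)) :
    (ps.foldl pvMinStep PySem.Dict.empty).items
      = (PySem.List.dedup (ps.map (·.1))).map (fun l =>
          (l, pvMinList ((ps.filter (fun p => p.1 == l)).map (·.2)))) := by
  induction ps using List.reverseRecOn with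
  | nil => rfl
  | append_singleton ps p ih =>
    rw [List.foldl_append, List.foldl_cons, List.foldl_nil]
    have hget := pvGet?OfItems _ _ _ ih
    have hded : PySem.List.dedup ((ps ++ [p]).map (·.1))
        = if p.1 ∈ ps.map (·.1) then PySem.List.dedup (ps.map (·.1))
          else PySem.List.dedup (ps.map (·.1)) ++ [p.1] := by
      simp only [List.map_append, List.map_cons, List.map_nil, PySem.List.dedup_eq_ofList,
        PySem.Set.ofList_append_singleton, PySem.Set.add_eq_ite, PySem.Set.mem_ofList]
    have hfilt : ∀ l, (ps ++ [p]).filter (fun q => q.1 == l)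
        = ps.filter (fun q => q.1 == l) ++ (if p.1 = l then [p] else []) := by
      intro l
      rw [List.filter_append, List.filter_singleton]
      by_cases h : p.1 = l
      · simp [h]
      · have hb : (p.1 == l) = false := by simpa using h
        simp [hb]
        exact h
    rw [show ∀ m : PySem.Dict String Int, pvMinStep m p = m.insert p.1 (min (m.getD p.1 p.2) p.2) from fun _ => rfl]
    by_cases hmem : p.1 ∈ ps.map (·.1)
    · obtain ⟨q, hq, hq1⟩ := List.mem_map.mp hmem
      have hne : (ps.filter (fun r => r.1 == p.1)).map (·.2) ≠ [] := by
        have : q ∈ ps.filter (fun r => r.1 == p.1) := by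
          rw [List.mem_filter]; exact ⟨hq, by simp [hq1]⟩
        intro hnil
        simp only [List.map_eq_nil_iff] at hnil
        rw [hnil] at this; exact List.not_mem_nil this
      have hold : (ps.foldl pvMinStep PySem.Dict.empty).getD p.1 p.2
          = pvMinList ((ps.filter (fun q => q.1 == p.1)).map (·.2)) := by
        rw [PySem.Dict.getD_eq_get?_getD, hget, if_pos (by
          rw [PySem.List.dedup_eq_ofList, PySem.Set.mem_ofList]; exact hmem)]
        rfl
      have hcont : (ps.foldl pvMinStep PySem.Dict.empty).contains p.1 = true := by
        rw [PySem.Dict.contains_eq_isSome_get?, hget, if_pos (by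
          rw [PySem.List.dedup_eq_ofList, PySem.Set.mem_ofList]; exact hmem)]
        rfl
      rw [hded, if_pos hmem, PySem.Dict.items_insert_of_contains _ _ hcont, ih, List.map_map]
      apply List.map_congr_left
      intro l _
      by_cases hlp : l = p.1
      · subst hlp
        have hval : pvMinList ((ps.filter (fun q => q.1 == p.1)).map (·.2) ++ [p.2])
            = min ((ps.foldl pvMinStep PySem.Dict.empty).getD p.1 p.2) p.2 := by
          rw [pvMinList_append _ _ hne, hold]
        simp [Function.comp, hfilt p.1, hval]
      · have hplp : ¬ p.1 = l := fun he => hlp he.symm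
        have hbl : (l == p.1) = false := by simpa using hlp
        simp [Function.comp, hbl, hfilt l, hplp]
    · have hcont : (ps.foldl pvMinStep PySem.Dict.empty).contains p.1 = false := by
        rw [PySem.Dict.contains_eq_isSome_get?, hget, if_neg (by
          rw [PySem.List.dedup_eq_ofList, PySem.Set.mem_ofList]; exact hmem)]
        rfl
      have hold : (ps.foldl pvMinStep PySem.Dict.empty).getD p.1 p.2 = p.2 :=
        PySem.Dict.getD_of_not_contains _ p.2 hcont
      have hempty : ps.filter (fun q => q.1 == p.1) = [] := by
        rw [List.filter_eq_nil_iff]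
        intro q hq hbeq
        exact hmem (List.mem_map.mpr ⟨q, hq, by simpa using hbeq⟩)
      rw [PySem.Dict.items_insert_of_not_contains _ _ hcont, ih, hded, if_neg hmem,
        List.map_append]
      congr 1
      · apply List.map_congr_left
        intro l hl
        have hlmem : l ∈ ps.map (·.1) := by
          rw [PySem.List.dedup_eq_ofList, PySem.Set.mem_ofList] at hl; exact hl
        have hplp : ¬ p.1 = l := fun he => hmem (he ▸ hlmem)
        simp [hfilt l, hplp]
      · have hs : ∀ x : Int, pvMinList [x] = x := fun x => rfl
        simp [hempty, hold, hs]

-- split a fold over the 4-component state into four independent folds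
lemma pvFoldlProd4 {α₁ α₂ α₃ α₄ β : Type} (F1 : α₁ → β → α₁) (F2 : α₂ → β → α₂)
    (F3 : α₃ → β → α₃) (F4 : α₄ → β → α₄) (l : List β) (a : α₁) (b : α₂) (c : α₃) (d : α₄) :
    l.foldl (fun (st : α₁ × α₂ × α₃ × α₄) w => (F1 st.1 w, F2 st.2.1 w, F3 st.2.2.1 w, F4 st.2.2.2 w)) (a, b, c, d)
      = (l.foldl F1 a, l.foldl F2 b, l.foldl F3 c, l.foldl F4 d) := by
  induction l generalizing a b c d with
  | nil => rfl
  | cons x t ih => simp only [List.foldl_cons]; exact ih _ _ _ _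

-- A's per-guess step is componentwise
lemma pvStepDecomp (st : pvStateA) (wf : String × String) :
    pvStepAfun st wf
      = ((pvEv wf).foldl pvGStep st.1,
         (pvEv wf).foldl pvYStepA st.2.1,
         (pvGyB wf).items.foldl pvMaxStep st.2.2.1,
         (pvCapsOf wf).foldl pvMinStep st.2.2.2) := by
  unfold pvStepAfun
  rw [pvInnerProj]
  simp only
  rw [pvGyEq]
  congr 1
  rw [pvPgmItems (pvGyB wf) _ PySem.Dict.empty
      (fun lk _ => PySem.Dict.contains_empty lk.1) ?_]
  · have he : (PySem.Dict.empty : PySem.Dict String Int).items = [] := rfl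
    rw [he, List.nil_append]
    rfl
  · rw [PySem.Dict.items_counter, List.map_map]
    simp only [Function.comp_def, List.map_id_fun', id]
    exact PySem.Set.nodup_ofList (wf.1.toList.map (fun c => String.ofList [c]))

-- the flattened min pairs are positive (Counter counts of present keys)
lemma pvMinsPos (guesses : List (String × String)) :
    ∀ p ∈ guesses.flatMap (fun wf => (pvGyB wf).items), (1:Int) ≤ p.2 := by
  intro p hp
  obtain ⟨wf, _, hpw⟩ := List.mem_flatMap.mp hp
  unfold pvGyB at hpw
  rw [PySem.Dict.items_counter] at hpw
  obtain ⟨k, hk, hkp⟩ := List.mem_map.mp hpw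
  rw [PySem.Set.mem_ofList] at hk
  have : 0 < (((wf.1.toList.zip wf.2.toList).filter (fun q => q.2 == 'G' || q.2 == 'Y')).map
      (fun q => String.ofList [q.1])).count k := List.count_pos_iff.mpr hk
  rw [← hkp]
  simp only
  omega

theorem accumulate_constraints_main (guesses : List (String × String)) :
    accumulate_constraints guesses = accumulate_constraints_alt guesses := by
  have hA : accumulate_constraints guesses
      = (let st := guesses.foldl pvStepAfun (PySem.Dict.empty, PySem.Dict.empty, PySem.Dict.empty, PySem.Dict.empty)
         (st.1.items, st.2.1.items, st.2.2.1.items, st.2.2.2.items)) := rfl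
  have hB : accumulate_constraints_alt guesses
      = (((guesses.flatMap pvEv).foldl pvGStep PySem.Dict.empty).items,
         ((guesses.flatMap pvEv).foldl pvYStepB PySem.Dict.empty).items,
         (PySem.List.dedup ((((guesses.map pvGyB).flatMap (fun g => g.items))).map (·.1))).map (fun l =>
           (l, pvMaxList (((((guesses.map pvGyB).flatMap (fun g => g.items))).filter (fun p => p.1 == l)).map (·.2)))),
         (PySem.List.dedup (((guesses.zip (guesses.map pvGyB)).flatMap (fun wg =>
             (((PySem.Dict.counter (wg.1.1.toList.map (fun c => String.ofList [c]))).items.filter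
               (fun lk => decide (wg.2.getD lk.1 0 < lk.2))).map (fun lk => (lk.1, wg.2.getD lk.1 0))))).map (·.1))).map (fun l =>
           (l, pvMinList ((((guesses.zip (guesses.map pvGyB)).flatMap (fun wg =>
             (((PySem.Dict.counter (wg.1.1.toList.map (fun c => String.ofList [c]))).items.filter
               (fun lk => decide (wg.2.getD lk.1 0 < lk.2))).map (fun lk => (lk.1, wg.2.getD lk.1 0))))).filter (fun p => p.1 == l)).map (·.2))))) := rfl
  have hsplit : guesses.foldl pvStepAfun (PySem.Dict.empty, PySem.Dict.empty, PySem.Dict.empty, PySem.Dict.empty)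
      = (guesses.foldl (fun g wf => (pvEv wf).foldl pvGStep g) PySem.Dict.empty,
         guesses.foldl (fun y wf => (pvEv wf).foldl pvYStepA y) PySem.Dict.empty,
         guesses.foldl (fun m wf => (pvGyB wf).items.foldl pvMaxStep m) PySem.Dict.empty,
         guesses.foldl (fun x wf => (pvCapsOf wf).foldl pvMinStep x) PySem.Dict.empty) := by
    rw [show pvStepAfun = (fun (st : pvStateA) wf =>
        ((pvEv wf).foldl pvGStep st.1, (pvEv wf).foldl pvYStepA st.2.1,
         (pvGyB wf).items.foldl pvMaxStep st.2.2.1, (pvCapsOf wf).foldl pvMinStep st.2.2.2))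
      from funext fun st => funext fun wf => pvStepDecomp st wf]
    exact pvFoldlProd4 (fun g wf => (pvEv wf).foldl pvGStep g)
      (fun y wf => (pvEv wf).foldl pvYStepA y)
      (fun m wf => (pvGyB wf).items.foldl pvMaxStep m)
      (fun x wf => (pvCapsOf wf).foldl pvMinStep x) guesses _ _ _ _
  have hG : guesses.foldl (fun g wf => (pvEv wf).foldl pvGStep g) PySem.Dict.empty
      = (guesses.flatMap pvEv).foldl pvGStep PySem.Dict.empty :=
    (List.foldl_flatMap).symm
  have hYfun : pvYStepA = pvYStepB := by
    funext b p
    unfold pvYStepA pvYStepB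
    by_cases hG' : p.2.2 = 'G'
    · simp [hG']
    · simp [hG']
  have hY : guesses.foldl (fun y wf => (pvEv wf).foldl pvYStepA y) PySem.Dict.empty
      = (guesses.flatMap pvEv).foldl pvYStepB PySem.Dict.empty := by
    rw [hYfun]; exact (List.foldl_flatMap).symm
  have hMflat : guesses.foldl (fun m wf => (pvGyB wf).items.foldl pvMaxStep m) PySem.Dict.empty
      = (guesses.flatMap (fun wf => (pvGyB wf).items)).foldl pvMaxStep PySem.Dict.empty :=
    (List.foldl_flatMap).symm
  have hMins : (guesses.map pvGyB).flatMap (fun g => g.items)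
      = guesses.flatMap (fun wf => (pvGyB wf).items) := List.flatMap_map _ _ _
  have hXflat : guesses.foldl (fun x wf => (pvCapsOf wf).foldl pvMinStep x) PySem.Dict.empty
      = (guesses.flatMap pvCapsOf).foldl pvMinStep PySem.Dict.empty :=
    (List.foldl_flatMap).symm
  have hCaps : (guesses.zip (guesses.map pvGyB)).flatMap (fun wg =>
        (((PySem.Dict.counter (wg.1.1.toList.map (fun c => String.ofList [c]))).items.filter
          (fun lk => decide (wg.2.getD lk.1 0 < lk.2))).map (fun lk => (lk.1, wg.2.getD lk.1 0))))
      = guesses.flatMap pvCapsOf := by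
    rw [← List.map_prod_left_eq_zip, List.flatMap_map]
    rfl
  rw [hA, hB, hsplit]
  dsimp only
  rw [hG, hY, hMins, hMflat, pvCharMax _ (pvMinsPos guesses), hCaps, hXflat, pvCharMin]

-- ===== VERDICT (by name: the statement is the Claim_ definition above) =====
theorem accumulate_constraints_spec : Claim_equal_accumulate_constraints := by
  intro guesses _
  unfold Spec_accumulate_constraints
  exact accumulate_constraints_main guesses
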